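-- pv_equiv track=rewrite | github.com/EMMAXZZZ/supabase-configurator | app/utils/character_sets.py | detect_character_tier
-- ===== SOURCE A (Python) =====
-- import string
--
-- TIER1_ALPHANUMERIC: str = string.ascii_letters + string.digits
--
-- TIER2_BASE64URL: str = TIER1_ALPHANUMERIC + "-_"
--
-- TIER3_HEX: str = "0123456789ABCDEF"
--
-- def detect_character_tier(value: str) -> str:
--     """Detect which tier a value best matches.
--
--     Args:
--         value (str): The string to classify.
--
--     Returns:
--         str: One of {"tier1", "tier2", "tier3", "mixed"}.
--     """
--     if all(ch in TIER3_HEX for ch in value):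
--         return "tier3"
--     if all(ch in TIER1_ALPHANUMERIC for ch in value):
--         return "tier1"
--     if all(ch in TIER2_BASE64URL for ch in value):
--         return "tier2"
--     return "mixed"
-- ===== SOURCE B (Python) =====
-- import string
--
-- TIER1_ALPHANUMERIC: str = string.ascii_letters + string.digits
-- TIER2_BASE64URL: str = TIER1_ALPHANUMERIC + "-_"
-- TIER3_HEX: str = "0123456789ABCDEF"
--
-- def detect_character_tier(value: str) -> str:
--     """Single combined pass: track all three tier candidacies at once."""
--     t3 = t1 = t2 = True
--     for ch in value:
--         if ch not in TIER3_HEX: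
--             t3 = False
--         if ch not in TIER1_ALPHANUMERIC:
--             t1 = False
--         if ch not in TIER2_BASE64URL:
--             t2 = False
--     if t3:
--         return "tier3"
--     if t1:
--         return "tier1"
--     if t2:
--         return "tier2"
--     return "mixed"
-- ===== Notes on version B (the rewrite author's own statement) =====
-- stated objective: alternative
-- what changed: Replaces A's three separate short-circuiting all(...) scans with one combined pass that maintains three boolean flags (tier3/tier1/tier2 candidacy) and decides the tier after the loop.
import Mathlib
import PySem

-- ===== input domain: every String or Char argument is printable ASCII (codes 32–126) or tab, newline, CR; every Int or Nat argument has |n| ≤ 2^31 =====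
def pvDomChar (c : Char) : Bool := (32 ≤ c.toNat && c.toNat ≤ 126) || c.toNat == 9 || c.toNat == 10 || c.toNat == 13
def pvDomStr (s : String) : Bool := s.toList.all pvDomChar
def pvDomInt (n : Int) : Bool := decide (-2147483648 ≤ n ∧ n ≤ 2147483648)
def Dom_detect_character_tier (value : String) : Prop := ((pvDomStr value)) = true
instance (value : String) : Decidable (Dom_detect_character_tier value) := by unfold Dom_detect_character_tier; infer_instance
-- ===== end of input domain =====

-- B replaces A's three separate all(...) scans with one combined pass holding three flags; objective: alternative decomposition, same cost.

-- ===== PORT A =====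
def TIER1_ALPHANUMERIC : String := "abcdefghijklmnopqrstuvwxyzABCDEFGHIJKLMNOPQRSTUVWXYZ0123456789"
def TIER2_BASE64URL : String := TIER1_ALPHANUMERIC ++ "-_"
def TIER3_HEX : String := "0123456789ABCDEF"

def detect_character_tier (value : String) : String :=
  if value.toList.all (fun ch => TIER3_HEX.toList.contains ch) then "tier3"
  else if value.toList.all (fun ch => TIER1_ALPHANUMERIC.toList.contains ch) then "tier1"
  else if value.toList.all (fun ch => TIER2_BASE64URL.toList.contains ch) then "tier2"
  else "mixed"

-- ===== PORT B =====
-- the single combined loop of Source B: three flags updated per character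
def tierLoop : List Char → Bool → Bool → Bool → Bool × Bool × Bool
  | [], t3, t1, t2 => (t3, t1, t2)
  | ch :: rest, t3, t1, t2 =>
      tierLoop rest
        (if !TIER3_HEX.toList.contains ch then false else t3)
        (if !TIER1_ALPHANUMERIC.toList.contains ch then false else t1)
        (if !TIER2_BASE64URL.toList.contains ch then false else t2)

def detect_character_tier_alt (value : String) : String :=
  let r := tierLoop value.toList true true true
  if r.1 then "tier3"
  else if r.2.1 then "tier1"
  else if r.2.2 then "tier2"
  else "mixed"

-- ===== PRECONDITION & SPEC =====
def Spec_detect_character_tier (value : String) (out : String) : Prop := out = detect_character_tier_alt value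
instance (value : String) (out : String) : Decidable (Spec_detect_character_tier value out) := by unfold Spec_detect_character_tier; infer_instance

-- ===== CLAIM (what is proved, stated in full; the proofs are below) =====
def Claim_equal_detect_character_tier : Prop := ∀ (value : String), Dom_detect_character_tier value → Spec_detect_character_tier value (detect_character_tier value)

-- ===== LEMMAS AND PROOFS =====
theorem tierLoop_eq (l : List Char) (t3 t1 t2 : Bool) :
    tierLoop l t3 t1 t2 =
      (t3 && l.all (fun ch => TIER3_HEX.toList.contains ch),
       t1 && l.all (fun ch => TIER1_ALPHANUMERIC.toList.contains ch),
       t2 && l.all (fun ch => TIER2_BASE64URL.toList.contains ch)) := by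
  induction l generalizing t3 t1 t2 with
  | nil => simp [tierLoop]
  | cons ch rest ih =>
      simp [tierLoop, ih]
      refine ⟨?_, ?_, ?_⟩ <;> ac_rfl

-- ===== VERDICT (by name: the statement is the Claim_ definition above) =====
theorem detect_character_tier_spec : Claim_equal_detect_character_tier := by
  intro value _
  unfold Spec_detect_character_tier detect_character_tier detect_character_tier_alt
  simp [tierLoop_eq]
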